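-- pv_equiv track=rewrite | github.com/hoangph1302/Steganography | lab1/code/methog2.py | steganography
-- ===== SOURCE A (Python) =====
-- def ChangeLetterToBinnary(letter):
--     binary=''
--     binary = '{0:08b}'.format(ord(letter)-1040)
--     return binary
--
-- def ChangeToBinary(text):
--     binary = ''
--     for i in range(len(text)):
--        binary = binary + ChangeLetterToBinnary(text[i])
--     return binary
--
-- def steganography(text,data):
--     binary = list(ChangeToBinary(text))
--     data = list(data)
--     index = -1
--     for i in range(len(binary)):
--         if binary[i] == '0':
--             index = data.index('\n',index+1) # find index of endline
--             data[index] = ' \n'               # we add 1 spacebar right before endline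
--         elif binary[i] == '1':
--             index = data.index('\n',index+1) # find index of endline
--             data[index] =  '\t\n'              # we add 1 tab right before endline
--     return ''.join(data)
-- ===== SOURCE B (Python) =====
-- def steganography(text, data):
--     # Single left-to-right pass: consume one '0'/'1' bit per newline instead of
--     # repeated data.index scans with in-place list mutation.
--     bits = [b for c in text for b in format(ord(c) - 1040, '08b') if b in '01']
--     out = []
--     k = 0
--     for ch in data:
--         if ch == '\n' and k < len(bits):
--             out.append(' \n' if bits[k] == '0' else '\t\n')
--             k += 1
--         else:
--             out.append(ch)
--     if k < len(bits):
--         raise ValueError('not enough newlines to embed all bits')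
--     return ''.join(out)
-- ===== Notes on version B (the rewrite author's own statement) =====
-- stated objective: simpler
-- what changed: Replaces A's bit-driven loop of repeated data.index('\n', start) scans with in-place list mutation by a single left-to-right pass over data that consumes one precomputed bit per newline encountered.
import Mathlib
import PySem

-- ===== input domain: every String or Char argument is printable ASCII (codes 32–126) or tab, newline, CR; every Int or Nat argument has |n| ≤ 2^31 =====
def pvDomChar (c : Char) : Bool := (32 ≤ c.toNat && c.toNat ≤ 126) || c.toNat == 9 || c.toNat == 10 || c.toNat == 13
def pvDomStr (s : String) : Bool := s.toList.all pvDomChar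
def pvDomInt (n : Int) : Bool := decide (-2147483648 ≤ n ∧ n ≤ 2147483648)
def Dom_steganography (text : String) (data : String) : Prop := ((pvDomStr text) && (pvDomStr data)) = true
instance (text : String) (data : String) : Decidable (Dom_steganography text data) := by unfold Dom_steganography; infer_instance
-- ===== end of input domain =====

-- B replaces A's repeated data.index scans with in-place mutation by a single
-- left-to-right pass over data consuming one bit per newline (objective: simpler).


-- ===== PORT A =====
-- binary digits of n, most significant first ('{0:b}' of n ≥ 1; [] for 0)
-- structural recursion with fuel (fuel n always suffices: the argument halves each step,
-- and (n+1)/2 ≤ n, so the value never depends on the fuel running out)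
def natBinDigitsAux : Nat → Nat → List Char
  | 0, _ => []
  | _+1, 0 => []
  | fuel+1, n+1 => natBinDigitsAux fuel ((n+1)/2) ++ [if (n+1) % 2 = 1 then '1' else '0']

def natBinDigits (n : Nat) : List Char := natBinDigitsAux n n

-- exact port of '{0:08b}'.format(v): sign, then digits zero-padded to total width 8
def formatB8 (v : Int) : List Char :=
  let ds := if v = 0 then ['0'] else natBinDigits v.natAbs
  if v < 0 then '-' :: (List.replicate (8 - 1 - ds.length) '0' ++ ds)
  else List.replicate (8 - ds.length) '0' ++ ds

def changeLetterToBinnary (c : Char) : List Char := formatB8 ((c.toNat : Int) - 1040)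

def changeToBinary (text : List Char) : List Char :=
  text.foldl (fun acc c => acc ++ changeLetterToBinnary c) []

-- data.index('\n', start): first index ≥ start holding "\n".  In A, start = index+1 ≥ 0
-- always (index is -1 or a found position), so the .toNat taken at the call site is exact.
def aFindNl (d : List (List Char)) (start : Nat) : Option Nat :=
  ((d.drop start).findIdx? (fun x => x == ['\n'])).map (start + ·)

def aStep (st : List (List Char) × Int) (c : Char) : List (List Char) × Int :=
  if c = '0' then
    match aFindNl st.1 (st.2 + 1).toNat with
    | some j => (st.1.set j [' ', '\n'], (j : Int))
    | none => st    -- Python raises ValueError here; Pre_ excludes exactly these inputs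
  else if c = '1' then
    match aFindNl st.1 (st.2 + 1).toNat with
    | some j => (st.1.set j ['\t', '\n'], (j : Int))
    | none => st
  else st

def steganography (text : String) (data : String) : String :=
  let binary := changeToBinary text.toList
  let d := data.toList.map (fun c => [c])       -- list(data): one-char strings
  let st := binary.foldl aStep (d, -1)
  String.mk st.1.flatten                        -- ''.join(data)

-- ===== PORT B =====
def isBit (c : Char) : Bool := c == '0' || c == '1'

def bStep (bits : List Char) (st : List (List Char) × Nat) (ch : Char) : List (List Char) × Nat :=
  if ch = '\n' ∧ st.2 < bits.length then
    (st.1 ++ [if bits.getD st.2 '0' = '0' then [' ', '\n'] else ['\t', '\n']], st.2 + 1)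
  else (st.1 ++ [[ch]], st.2)

def steganography_alt (text : String) (data : String) : String :=
  let bits := (text.toList.flatMap (fun c => formatB8 ((c.toNat : Int) - 1040))).filter isBit
  let st := data.toList.foldl (bStep bits) ([], 0)
  -- Source B raises ValueError when st.2 < bits.length (leftover bits); Pre_ excludes those inputs
  String.mk st.1.flatten

-- ===== PRECONDITION & SPEC =====
-- Pre_ excludes exactly the inputs on which A's data.index call fails (ValueError): the
-- number of binary digits generated from text (Nat.log2 (1040-ord c) + 1 per character,
-- the sign is not a digit) must not exceed the number of newlines in data; B raises there too.
def Pre_steganography (text : String) (data : String) : Prop :=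
  (text.toList.map (fun c => Nat.log2 (1040 - c.toNat) + 1)).sum ≤ data.toList.count '\n'
instance (text : String) (data : String) : Decidable (Pre_steganography text data) := by
  unfold Pre_steganography; infer_instance

def pvWitness_steganography : String × String := ("a", "\n\n\n\n\n\n\n\n\n\n")

def Spec_steganography (text : String) (data : String) (out : String) : Prop := out = steganography_alt text data
instance (text : String) (data : String) (out : String) : Decidable (Spec_steganography text data out) := by unfold Spec_steganography; infer_instance

-- ===== CLAIM (what is proved, stated in full; the proofs are below) =====
def Claim_equal_steganography : Prop := ∀ (text : String) (data : String), Dom_steganography text data → Pre_steganography text data → Spec_steganography text data (steganography text data)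

-- ===== LEMMAS AND PROOFS =====
def rep (b : Char) : List Char := if b = '0' then [' ', '\n'] else ['\t', '\n']

-- common specification of the encoded output, as a list of "cells"
def encodeS : List Char → List Char → List (List Char)
  | _, [] => []
  | [], c :: cs => [c] :: encodeS [] cs
  | b :: bs, c :: cs => if c = '\n' then rep b :: encodeS bs cs else [c] :: encodeS (b :: bs) cs

lemma encodeS_nil_bits (cs : List Char) : encodeS [] cs = cs.map (fun c => [c]) := by
  induction cs with
  | nil => rfl
  | cons c cs ih => simp [encodeS, ih]

lemma encodeS_cons_ne (bs : List Char) (c : Char) (cs : List Char) (h : c ≠ '\n') :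
    encodeS bs (c :: cs) = [c] :: encodeS bs cs := by
  cases bs with
  | nil => rfl
  | cons b bs => simp [encodeS, h]

lemma encodeS_skip (b : Char) (bs : List Char) (u v : List Char) (hu : '\n' ∉ u) :
    encodeS (b :: bs) (u ++ '\n' :: v) = u.map (fun c => [c]) ++ rep b :: encodeS bs v := by
  induction u with
  | nil => simp [encodeS]
  | cons x u ih =>
      have hx : x ≠ '\n' := fun h => hu (h ▸ List.mem_cons_self)
      have hu' : '\n' ∉ u := fun h => hu (List.mem_cons_of_mem _ h)
      simp [encodeS, hx, ih hu']

lemma split_at_nl (rest : List Char) (h : '\n' ∈ rest) :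
    ∃ u v, rest = u ++ '\n' :: v ∧ '\n' ∉ u := by
  induction rest with
  | nil => cases h
  | cons c cs ih =>
      by_cases hc : c = '\n'
      · exact ⟨[], cs, by simp [hc], by simp⟩
      · rcases ih (by rcases List.mem_cons.mp h with h | h; exact absurd h.symm hc; exact h) with ⟨u, v, rfl, hu⟩
        exact ⟨c :: u, v, rfl, by simp [hu, Ne.symm hc]⟩

lemma foldl_aStep_filter (cs : List Char) : ∀ st,
    cs.foldl aStep st = (cs.filter isBit).foldl aStep st := by
  induction cs with
  | nil => intro st; rfl
  | cons c cs ih =>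
      intro st
      rw [List.foldl_cons, List.filter_cons]
      by_cases hb : isBit c = true
      · rw [if_pos hb, List.foldl_cons, ih]
      · have h0 : c ≠ '0' := by intro h; simp [isBit, h] at hb
        have h1 : c ≠ '1' := by intro h; simp [isBit, h] at hb
        rw [if_neg hb, show aStep st c = st from by simp [aStep, h0, h1], ih]

lemma findIdx_nl (u : List Char) (w : List (List Char)) (hu : '\n' ∉ u) :
    ((u.map (fun c => [c]) ++ ['\n'] :: w).findIdx? (fun x => x == ['\n'])) = some u.length := by
  induction u with
  | nil => rw [List.map_nil, List.nil_append, List.findIdx?_cons]; simp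
  | cons x u ih =>
      have hx : x ≠ '\n' := fun h => hu (h ▸ List.mem_cons_self)
      have hu' : '\n' ∉ u := fun h => hu (List.mem_cons_of_mem _ h)
      have hpx : (([x] : List Char) == ['\n']) = false := by simp [hx]
      rw [List.map_cons, List.cons_append, List.findIdx?_cons, hpx]
      simp [ih hu']

lemma set_mid (p um : List (List Char)) (x a : List Char) (vm : List (List Char)) :
    (p ++ (um ++ x :: vm)).set (p.length + um.length) a = p ++ (um ++ a :: vm) := by
  rw [List.set_append_right _ _ (Nat.le_add_right _ _), Nat.add_sub_cancel_left,
    List.set_append_right _ _ (Nat.le_refl _), Nat.sub_self]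
  rfl

lemma aLoop (bs : List Char) : ∀ (p : List (List Char)) (rest : List Char),
    (∀ b ∈ bs, b = '0' ∨ b = '1') → bs.length ≤ rest.count '\n' →
    (bs.foldl aStep (p ++ rest.map (fun c => [c]), (p.length : Int) - 1)).1
      = p ++ encodeS bs rest := by
  induction bs with
  | nil => intro p rest _ _; simp [List.foldl, encodeS_nil_bits]
  | cons b bs ih =>
      intro p rest hbit hcnt
      have hmem : '\n' ∈ rest := by
        have : 0 < rest.count '\n' := lt_of_lt_of_le (Nat.succ_pos _) hcnt
        exact List.count_pos_iff.mp this
      rcases split_at_nl rest hmem with ⟨u, v, rfl, hu⟩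
      have hu0 : u.count '\n' = 0 := List.count_eq_zero.mpr hu
      have hcnt' : bs.length ≤ v.count '\n' := by
        rw [List.length_cons] at hcnt
        rw [List.count_append, List.count_cons] at hcnt
        simp [hu0] at hcnt
        omega
      have hbit' : ∀ x ∈ bs, x = '0' ∨ x = '1' := fun x hx => hbit x (List.mem_cons_of_mem _ hx)
      have hb := hbit b List.mem_cons_self
      have hstart : (((p.length : Int) - 1) + 1).toNat = p.length := by omega
      have hfind : aFindNl (p ++ (u.map (fun c => [c]) ++ ['\n'] :: v.map (fun c => [c]))) p.length
          = some (p.length + u.length) := by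
        unfold aFindNl
        rw [List.drop_left, findIdx_nl u _ hu]
        simp
      have hset : ∀ a, (p ++ (u.map (fun c => [c]) ++ ['\n'] :: v.map (fun c => [c]))).set
            (p.length + u.length) a
          = p ++ (u.map (fun c => [c]) ++ a :: v.map (fun c => [c])) := by
        intro a
        have h := set_mid p (u.map (fun c => [c])) ['\n'] a (v.map (fun c => [c]))
        simp only [List.length_map] at h
        exact h
      have hmap : (u ++ '\n' :: v).map (fun c => ([c] : List Char))
          = u.map (fun c => [c]) ++ ['\n'] :: v.map (fun c => [c]) := by simp
      have hstep : aStep (p ++ (u.map (fun c => [c]) ++ ['\n'] :: v.map (fun c => [c])),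
            (p.length : Int) - 1) b
          = (p ++ (u.map (fun c => [c]) ++ rep b :: v.map (fun c => [c])),
             ((p.length + u.length : Nat) : Int)) := by
        rcases hb with hb | hb <;> subst hb <;>
          simp only [aStep, hstart, hfind, hset, rep, reduceIte,
            Char.reduceEq, if_false]
      have hre : p ++ (u.map (fun c => ([c] : List Char)) ++ rep b :: v.map (fun c => [c]))
          = (p ++ u.map (fun c => [c]) ++ [rep b]) ++ v.map (fun c => [c]) := by simp
      have hlen : ((p.length + u.length : Nat) : Int)
          = ((p ++ u.map (fun c => ([c] : List Char)) ++ [rep b]).length : Int) - 1 := by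
        simp [List.length_append]
        ring
      rw [hmap, List.foldl_cons, hstep, hre, hlen,
        ih (p ++ u.map (fun c => [c]) ++ [rep b]) v hbit' hcnt',
        encodeS_skip b bs u v hu]
      simp

lemma bLoop (bits : List Char) : ∀ (cs : List Char) (out : List (List Char)) (k : Nat),
    (cs.foldl (bStep bits) (out, k)).1 = out ++ encodeS (bits.drop k) cs := by
  intro cs
  induction cs with
  | nil => intro out k; simp [List.foldl, encodeS]
  | cons c cs ih =>
      intro out k
      by_cases hc : c = '\n'
      · by_cases hk : k < bits.length
        · have hdrop : bits.drop k = bits[k] :: bits.drop (k + 1) :=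
            List.drop_eq_getElem_cons hk
          have hgd : bits.getD k '0' = bits[k] := List.getD_eq_getElem bits '0' hk
          simp only [List.foldl_cons, bStep, hc, hk, and_true, if_true, ih, hdrop, encodeS,
            hgd]
          simp [rep]
        · have hdrop : bits.drop k = [] := List.drop_eq_nil_of_le (le_of_not_gt hk)
          simp [List.foldl_cons, bStep, hc, hk, ih, hdrop, encodeS_nil_bits]
      · have : bStep bits (out, k) c = (out ++ [[c]], k) := by simp [bStep, hc]
        rw [List.foldl_cons, this, ih, encodeS_cons_ne _ _ _ hc]
        simp

lemma changeToBinary_eq_flatMap (l : List Char) :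
    changeToBinary l = l.flatMap (fun c => formatB8 ((c.toNat : Int) - 1040)) := by
  rw [show (fun c => formatB8 ((c.toNat : Int) - 1040)) = changeLetterToBinnary from rfl]
  unfold changeToBinary
  simpa using PySem.List.foldl_append_eq_flatMap changeLetterToBinnary l []

lemma char_bits_len : ∀ n : Nat, n < 127 →
    ((formatB8 ((n : Int) - 1040)).filter isBit).length = Nat.log2 (1040 - n) + 1 := by decide

lemma bits_length (l : List Char) (h : ∀ c ∈ l, pvDomChar c = true) :
    ((l.flatMap (fun c => formatB8 ((c.toNat : Int) - 1040))).filter isBit).length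
      = (l.map (fun c => Nat.log2 (1040 - c.toNat) + 1)).sum := by
  induction l with
  | nil => rfl
  | cons c cs ih =>
      have hc := h c List.mem_cons_self
      have hlt : c.toNat < 127 := by
        simp [pvDomChar] at hc; omega
      have := char_bits_len c.toNat hlt
      simp only [List.flatMap_cons, List.filter_append, List.length_append, List.map_cons,
        List.sum_cons, this, ih (fun x hx => h x (List.mem_cons_of_mem _ hx))]

-- ===== VERDICT (by name: the statement is the Claim_ definition above) =====
theorem steganography_spec : Claim_equal_steganography := by
  intro text data hdom hpre
  unfold Spec_steganography steganography steganography_alt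
  have hbin : changeToBinary text.toList
      = text.toList.flatMap (fun c => formatB8 ((c.toNat : Int) - 1040)) :=
    changeToBinary_eq_flatMap text.toList
  set bits := (text.toList.flatMap (fun c => formatB8 ((c.toNat : Int) - 1040))).filter isBit with hbits
  have hdomtext : ∀ c ∈ text.toList, pvDomChar c = true := by
    have : pvDomStr text = true := by
      unfold Dom_steganography at hdom
      rw [Bool.and_eq_true] at hdom
      exact hdom.1
    exact List.all_eq_true.mp this
  have hlen : bits.length ≤ data.toList.count '\n' := by
    have := bits_length text.toList hdomtext
    unfold Pre_steganography at hpre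
    rw [hbits, this]
    exact hpre
  have hbitmem : ∀ b ∈ bits, b = '0' ∨ b = '1' := by
    intro b hb
    have := List.of_mem_filter hb
    simp [isBit] at this
    tauto
  have hA : ((changeToBinary text.toList).foldl aStep (data.toList.map (fun c => [c]), -1)).1
      = encodeS bits data.toList := by
    rw [foldl_aStep_filter, hbin]
    have := aLoop bits [] data.toList hbitmem hlen
    simpa using this
  have hB : (data.toList.foldl (bStep bits) ([], 0)).1 = encodeS bits data.toList := by
    simpa using bLoop bits data.toList [] 0
  simp only [hA, hB]
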